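-- pv_equiv track=rewrite | github.com/Shraman-jain/CodeForces-Python | rating_below_1300/320A - Magic Numbers.py | f
-- ===== SOURCE A (Python) =====
-- def f(n):
--     n=str(n)
--     for i in range(len(n)):
--
--         if n[i]!='1' and  n[i]!='4':
--             return False
--         elif n[0]=='4':
--             return False
--         elif '444' in n:
--             return False
--         else:
--             continue
--
--     return True
-- ===== SOURCE B (Python) =====
-- def f(n):
--     # Greedily parse str(n) block by block: each block is a '1' followed by up to two '4's.
--     s = str(n)
--     i = 0
--     while i < len(s):
--         if s[i] != '1':
--             return False
--         i += 1
--         if i < len(s) and s[i] == '4':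
--             i += 1
--         if i < len(s) and s[i] == '4':
--             i += 1
--     return True
-- ===== Notes on version B (the rewrite author's own statement) =====
-- stated objective: alternative
-- what changed: Instead of A's index loop that re-tests the first digit and re-scans the whole string for a triple-four substring at every position, B greedily parses str(n) block by block (a one-digit followed by up to two four-digits), with no substring search at all.
import Mathlib
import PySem

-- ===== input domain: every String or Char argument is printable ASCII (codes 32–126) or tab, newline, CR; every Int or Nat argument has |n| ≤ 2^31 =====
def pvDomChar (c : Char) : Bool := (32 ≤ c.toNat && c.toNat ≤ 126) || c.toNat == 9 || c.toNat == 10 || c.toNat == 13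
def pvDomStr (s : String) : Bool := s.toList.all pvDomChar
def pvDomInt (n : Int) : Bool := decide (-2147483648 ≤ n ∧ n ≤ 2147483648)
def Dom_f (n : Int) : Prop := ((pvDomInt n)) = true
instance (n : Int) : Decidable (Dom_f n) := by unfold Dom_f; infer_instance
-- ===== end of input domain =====

-- B replaces A's index loop (which re-tests n[0]=='4' and '444' in n at every index) by a
-- single greedy left-to-right parse of str(n), block = a '1' then up to two '4's; values agree.

-- ===== PORT A =====
-- the 'for i in range(len(n))' loop, walking the characters of n; `s` is the whole string n
def loopA (s : List Char) : List Char → Bool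
  | [] => true
  | c :: rest =>
    if c ≠ '1' ∧ c ≠ '4' then false
    else if PySem.List.pyGetD s 0 ' ' = '4' then false
    else if PySem.Chars.isIn ['4', '4', '4'] s then false
    else loopA s rest

def f (n : Int) : Bool :=
  let s := PySem.Int.toChars n
  loopA s s

-- ===== PORT B =====
-- `if i < len(s) and s[i] == '4': i += 1` — advance past one '4' if it is next
def eat1 : List Char → List Char
  | [] => []
  | c :: r => if c = '4' then r else c :: r

theorem eat1_length_le (l : List Char) : (eat1 l).length ≤ l.length := by
  cases l with
  | nil => simp [eat1]
  | cons c r => simp only [eat1]; split <;> simp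

-- the outer 'while i < len(s)' loop of B, on the not-yet-consumed suffix of str(n)
def goB : List Char → Bool
  | [] => true
  | c :: rest =>
    if c ≠ '1' then false
    else goB (eat1 (eat1 rest))
termination_by l => l.length
decreasing_by
  calc (eat1 (eat1 rest)).length ≤ (eat1 rest).length := eat1_length_le _
    _ ≤ rest.length := eat1_length_le _
    _ < (c :: rest).length := by simp

def f_alt (n : Int) : Bool := goB (PySem.Int.toChars n)

-- ===== PRECONDITION & SPEC =====
def Spec_f (n : Int) (out : Bool) : Prop := out = f_alt n
instance (n : Int) (out : Bool) : Decidable (Spec_f n out) := by unfold Spec_f; infer_instance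

-- ===== CLAIM (what is proved, stated in full; the proofs are below) =====
def Claim_equal_f : Prop := ∀ (n : Int), Dom_f n → Spec_f n (f n)

-- ===== LEMMAS AND PROOFS =====

-- the common characterisation: only '1'/'4' digits, a leading '1', and no "444" substring
def Magic (s : List Char) : Prop :=
  (∀ c ∈ s, c = '1' ∨ c = '4') ∧ (∀ a t, s = a :: t → a = '1') ∧ ¬ (['4', '4', '4'] <:+: s)

theorem isIn_iff_infix_chars (sub s : List Char) :
    PySem.Chars.isIn sub s = true ↔ sub <:+: s := by
  have := PySem.Str.isIn_iff_infix (String.ofList sub) (String.ofList s)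
  simpa [PySem.Str.isIn] using this

theorem infix444_cons_of_ne (c : Char) (hc : c ≠ '4') (l : List Char) :
    (['4', '4', '4'] <:+: c :: l) ↔ (['4', '4', '4'] <:+: l) := by
  rw [List.infix_cons_iff, List.cons_prefix_cons]
  simp [Ne.symm hc]

theorem not_prefix4 (r : List Char) (h : ∀ a t, r = a :: t → a ≠ '4') : ¬ (['4'] <+: r) := by
  cases r with
  | nil => simp
  | cons a t =>
    rw [List.cons_prefix_cons]
    rintro ⟨h4, -⟩
    exact h a t rfl h4.symm

theorem not_prefix44 (r : List Char) (h : ∀ a t, r = a :: t → a ≠ '4') : ¬ (['4', '4'] <+: r) := by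
  cases r with
  | nil => simp
  | cons a t =>
    rw [List.cons_prefix_cons]
    rintro ⟨h4, -⟩
    exact h a t rfl h4.symm

theorem infix444_four_cons (r : List Char) (h : ∀ a t, r = a :: t → a ≠ '4') :
    (['4', '4', '4'] <:+: '4' :: r) ↔ (['4', '4', '4'] <:+: r) := by
  rw [List.infix_cons_iff, List.cons_prefix_cons]
  simp only [true_and]
  constructor
  · rintro (hp | hi)
    · exact absurd hp (not_prefix44 r h)
    · exact hi
  · exact Or.inr

theorem magic_one_cons (rest : List Char) (h : ∀ a t, rest = a :: t → a ≠ '4') :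
    Magic ('1' :: rest) ↔ Magic rest := by
  unfold Magic
  rw [infix444_cons_of_ne '1' (by decide) rest]
  constructor
  · rintro ⟨hall, -, hinf⟩
    refine ⟨fun c hc => hall c (List.mem_cons_of_mem _ hc), ?_, hinf⟩
    rintro a t rfl
    rcases hall a (by simp) with h1 | h4
    · exact h1
    · exact absurd h4 (h a t rfl)
  · rintro ⟨hall, -, hinf⟩
    refine ⟨?_, ?_, hinf⟩
    · intro c hc
      rcases List.mem_cons.mp hc with rfl | hc
      · exact Or.inl rfl
      · exact hall c hc
    · rintro a t ht
      injection ht with h1 _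
      exact h1.symm

theorem magic_one_four (r : List Char) (h : ∀ a t, r = a :: t → a ≠ '4') :
    Magic ('1' :: '4' :: r) ↔ Magic r := by
  unfold Magic
  rw [infix444_cons_of_ne '1' (by decide), infix444_four_cons r h]
  constructor
  · rintro ⟨hall, -, hinf⟩
    refine ⟨fun c hc => hall c (by simp [hc]), ?_, hinf⟩
    rintro a t rfl
    rcases hall a (by simp) with h1 | h4
    · exact h1
    · exact absurd h4 (h a t rfl)
  · rintro ⟨hall, -, hinf⟩
    refine ⟨?_, ?_, hinf⟩
    · intro c hc
      rcases List.mem_cons.mp hc with rfl | hc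
      · exact Or.inl rfl
      · rcases List.mem_cons.mp hc with rfl | hc
        · exact Or.inr rfl
        · exact hall c hc
    · rintro a t ht
      injection ht with h1 _
      exact h1.symm

theorem magic_one_four_four (r : List Char) :
    Magic ('1' :: '4' :: '4' :: r) ↔ Magic r := by
  by_cases hh : ∃ t, r = '4' :: t
  · obtain ⟨t, rfl⟩ := hh
    unfold Magic
    constructor
    · rintro ⟨-, -, hinf⟩
      exact absurd ⟨['1'], t, rfl⟩ hinf
    · rintro ⟨-, hhead, -⟩
      exact absurd (hhead '4' t rfl) (by decide)
  · have h : ∀ a t, r = a :: t → a ≠ '4' := by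
      rintro a t rfl rfl
      exact hh ⟨t, rfl⟩
    unfold Magic
    rw [infix444_cons_of_ne '1' (by decide)]
    rw [show (['4', '4', '4'] <:+: '4' :: '4' :: r) ↔ (['4', '4', '4'] <:+: r) from ?_]
    · constructor
      · rintro ⟨hall, -, hinf⟩
        refine ⟨fun c hc => hall c (by simp [hc]), ?_, hinf⟩
        rintro a t rfl
        rcases hall a (by simp) with h1 | h4
        · exact h1
        · exact absurd h4 (h a t rfl)
      · rintro ⟨hall, -, hinf⟩
        refine ⟨?_, ?_, hinf⟩
        · intro c hc
          rcases List.mem_cons.mp hc with rfl | hc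
          · exact Or.inl rfl
          · rcases List.mem_cons.mp hc with rfl | hc
            · exact Or.inr rfl
            · rcases List.mem_cons.mp hc with rfl | hc
              · exact Or.inr rfl
              · exact hall c hc
        · rintro a t ht
          injection ht with h1 _
          exact h1.symm
    · rw [List.infix_cons_iff, List.cons_prefix_cons]
      simp only [true_and]
      constructor
      · rintro (hp | hi)
        · exact absurd (List.cons_prefix_cons.mp hp).2 (not_prefix4 r h)
        · rwa [infix444_four_cons r h] at hi
      · intro hi
        exact Or.inr ((infix444_four_cons r h).mpr hi)

theorem goB_char (s : List Char) : goB s = true ↔ Magic s := by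
  induction s using goB.induct with
  | case1 => simp [goB, Magic]
  | case2 c r hc =>
    rw [goB, if_pos hc]
    constructor
    · intro h
      exact absurd h (by decide)
    · rintro ⟨-, hhead, -⟩
      exact absurd (hhead c r rfl) hc
  | case3 c r hc ih =>
    have hc1 : c = '1' := not_not.mp hc
    subst hc1
    rw [goB, if_neg (by simp), ih]
    rcases r with _ | ⟨a, t⟩
    · simpa [eat1] using (magic_one_cons [] (by rintro a t ⟨⟩)).symm
    · by_cases ha : a = '4'
      · subst ha
        rcases t with _ | ⟨b, u⟩
        · simpa [eat1] using (magic_one_four [] (by rintro a t ⟨⟩)).symm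
        · by_cases hb : b = '4'
          · subst hb
            simpa [eat1] using (magic_one_four_four u).symm
          · have e : eat1 (eat1 ('4' :: b :: u)) = b :: u := by simp [eat1, hb]
            rw [e]
            refine (magic_one_four (b :: u) ?_).symm
            rintro x y hxy h4
            injection hxy with h1 _
            exact hb (h1 ▸ h4)
      · have e : eat1 (eat1 (a :: t)) = a :: t := by simp [eat1, ha]
        rw [e]
        refine (magic_one_cons (a :: t) ?_).symm
        rintro x y hxy h4
        injection hxy with h1 _
        exact ha (h1 ▸ h4)

theorem loopA_char (s t : List Char) :
    loopA s t = true ↔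
      ((∀ c ∈ t, c = '1' ∨ c = '4') ∧
        (t = [] ∨ (PySem.List.pyGetD s 0 ' ' ≠ '4' ∧ ¬ (['4', '4', '4'] <:+: s)))) := by
  induction t with
  | nil => simp [loopA]
  | cons c rest ih =>
    by_cases h1 : c ≠ '1' ∧ c ≠ '4'
    · rw [loopA, if_pos h1]
      constructor
      · intro h
        exact absurd h (by decide)
      · rintro ⟨hall, -⟩
        rcases hall c (by simp) with h | h
        · exact (h1.1 h).elim
        · exact (h1.2 h).elim
    · by_cases h2 : PySem.List.pyGetD s 0 ' ' = '4'
      · rw [loopA, if_neg h1, if_pos h2]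
        constructor
        · intro h
          exact absurd h (by decide)
        · rintro ⟨-, h | ⟨hne, -⟩⟩
          · exact absurd h (by simp)
          · exact (hne h2).elim
      · by_cases h3 : PySem.Chars.isIn ['4', '4', '4'] s = true
        · rw [loopA, if_neg h1, if_neg h2, if_pos h3]
          constructor
          · intro h
            exact absurd h (by decide)
          · rintro ⟨-, h | ⟨-, hinf⟩⟩
            · exact absurd h (by simp)
            · exact (hinf ((isIn_iff_infix_chars _ _).mp h3)).elim
        · have h3' : ¬ (['4', '4', '4'] <:+: s) := fun h => h3 ((isIn_iff_infix_chars _ _).mpr h)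
          rw [loopA, if_neg h1, if_neg h2]
          rw [if_neg (by simpa using h3), ih]
          rcases not_and_or.mp h1 with hc | hc
          · have hc : c = '1' := not_not.mp hc
            constructor
            · rintro ⟨hall, -⟩
              exact ⟨fun x hx => (List.mem_cons.mp hx).elim (fun hxe => Or.inl (hxe.trans hc)) (hall x),
                Or.inr ⟨h2, h3'⟩⟩
            · rintro ⟨hall, -⟩
              exact ⟨fun x hx => hall x (List.mem_cons_of_mem _ hx), Or.inr ⟨h2, h3'⟩⟩
          · have hc : c = '4' := not_not.mp hc
            constructor
            · rintro ⟨hall, -⟩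
              exact ⟨fun x hx => (List.mem_cons.mp hx).elim (fun hxe => Or.inr (hxe.trans hc)) (hall x),
                Or.inr ⟨h2, h3'⟩⟩
            · rintro ⟨hall, -⟩
              exact ⟨fun x hx => hall x (List.mem_cons_of_mem _ hx), Or.inr ⟨h2, h3'⟩⟩

-- ===== VERDICT (by name: the statement is the Claim_ definition above) =====
theorem f_spec : Claim_equal_f := by
  intro n _
  unfold Spec_f f f_alt
  set s := PySem.Int.toChars n with hsdef
  clear hsdef
  rw [Bool.eq_iff_iff, loopA_char, goB_char]
  cases s with
  | nil => simp [Magic]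
  | cons a t =>
    have hget : PySem.List.pyGetD (a :: t) 0 ' ' = a := by
      simp [PySem.List.pyGetD, PySem.List.pyGet?, PySem.List.pyIdx?]
    rw [hget]
    unfold Magic
    constructor
    · rintro ⟨hall, h | ⟨hne, hinf⟩⟩
      · exact absurd h (by simp)
      · refine ⟨hall, ?_, hinf⟩
        rintro b u hbu
        have hba : b = a := by injection hbu with h _; exact h.symm
        subst hba
        rcases hall b (by simp) with h1 | h4
        · exact h1
        · exact absurd h4 hne
    · rintro ⟨hall, hhead, hinf⟩
      refine ⟨hall, Or.inr ⟨?_, hinf⟩⟩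
      have : a = '1' := hhead a t rfl
      simp [this]
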